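-- pv_equiv track=rewrite | github.com/MiyainNYC/Rose | CodeON/deduplicate.py | deduplicate_s
-- ===== SOURCE A (Python) =====
-- def deduplicate_s(nums):
--     if len(nums)<2:
--         return nums
--
--     head = nums[0]
--
--     if nums[1]==head:
--         return deduplicate_s([i for i in nums[1:] if i!=head])
--     if nums[1]!=head:
--         return deduplicate_s(nums[1:])+[head]
-- ===== SOURCE B (Python) =====
-- def deduplicate_s(nums):
--     banned = set()
--     kept = []
--     pending = None
--     has_pending = False
--     for x in nums:
--         if x in banned:
--             continue
--         if has_pending and pending == x:
--             banned.add(x)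
--             has_pending = False
--         else:
--             if has_pending:
--                 kept.append(pending)
--             pending = x
--             has_pending = True
--     if has_pending:
--         kept.append(pending)
--     kept.reverse()
--     return kept
-- ===== Notes on version B (the rewrite author's own statement) =====
-- stated objective: faster
-- what changed: Replaces A's O(n^2) recursion (which rescans and re-filters the tail on every duplicate) by a single forward pass keeping a banned-value set and a pending element, then one reverse.
import Mathlib
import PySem

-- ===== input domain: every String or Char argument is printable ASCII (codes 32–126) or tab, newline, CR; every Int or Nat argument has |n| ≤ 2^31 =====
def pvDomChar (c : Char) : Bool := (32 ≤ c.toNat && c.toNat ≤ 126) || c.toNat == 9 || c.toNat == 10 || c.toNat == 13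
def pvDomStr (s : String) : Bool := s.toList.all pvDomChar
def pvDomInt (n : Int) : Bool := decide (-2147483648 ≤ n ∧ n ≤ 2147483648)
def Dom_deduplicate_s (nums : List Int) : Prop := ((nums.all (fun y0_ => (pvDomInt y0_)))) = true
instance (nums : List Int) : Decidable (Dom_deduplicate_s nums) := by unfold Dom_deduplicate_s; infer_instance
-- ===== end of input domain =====

-- B replaces A's recursion (which re-filters the tail at every adjacent duplicate)
-- by one forward pass with a banned-value set and a pending element, then a reverse.

-- ===== PORT A =====
-- 'len(nums)<2: return nums' and nums[0]/nums[1]/nums[1:] become the three-way pattern match.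
def deduplicate_s (nums : List Int) : List Int :=
  match nums with
  | [] => []
  | [a] => [a]
  | a :: b :: rest =>
    if b = a then
      deduplicate_s ((b :: rest).filter (fun i => i ≠ a))
    else
      deduplicate_s (b :: rest) ++ [a]
termination_by nums.length
decreasing_by
  · simpa using Nat.lt_succ_of_le (List.length_filter_le _ (b :: rest))
  · simp

-- ===== PORT B =====
-- loop state = (banned set, kept list, pending element); Python's has_pending flag + pending is the Option
def dedupStep (st : PySem.Set Int × List Int × Option Int) (x : Int) :
    PySem.Set Int × List Int × Option Int :=
  let (banned, kept, pending) := st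
  if banned.contains x then st
  else
    match pending with
    | some p => if p = x then (PySem.Set.add banned x, kept, none)
                else (banned, kept ++ [p], some x)
    | none => (banned, kept, some x)

def deduplicate_s_alt (nums : List Int) : List Int :=
  let (_, kept, pending) := nums.foldl dedupStep (PySem.Set.empty, [], none)
  (match pending with
   | some p => kept ++ [p]
   | none => kept).reverse

-- ===== PRECONDITION & SPEC =====
def Spec_deduplicate_s (nums : List Int) (out : List Int) : Prop := out = deduplicate_s_alt nums
instance (nums : List Int) (out : List Int) : Decidable (Spec_deduplicate_s nums out) := by unfold Spec_deduplicate_s; infer_instance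

-- ===== CLAIM (what is proved, stated in full; the proofs are below) =====
def Claim_equal_deduplicate_s : Prop := ∀ (nums : List Int), Dom_deduplicate_s nums → Spec_deduplicate_s nums (deduplicate_s nums)

-- ===== LEMMAS AND PROOFS =====

def dedupFin (st : PySem.Set Int × List Int × Option Int) : List Int :=
  (match st.2.2 with
   | some p => st.2.1 ++ [p]
   | none => st.2.1).reverse

theorem alt_eq_fin (nums : List Int) :
    deduplicate_s_alt nums = dedupFin (nums.foldl dedupStep (PySem.Set.empty, [], none)) := by
  unfold deduplicate_s_alt dedupFin
  rcases nums.foldl dedupStep (PySem.Set.empty, [], none) with ⟨S, k, p⟩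
  rfl

-- pointwise step equations (so that dedupStep inside foldl is never unfolded)
theorem step_banned {S : PySem.Set Int} {k : List Int} {p : Option Int} {x : Int}
    (hc : S.contains x = true) : dedupStep (S, k, p) x = (S, k, p) := by
  have hm : x ∈ S := by simpa using hc
  simp [dedupStep, hm]

theorem step_none {S : PySem.Set Int} {k : List Int} {x : Int}
    (hc : S.contains x = false) : dedupStep (S, k, none) x = (S, k, some x) := by
  have hm : x ∉ S := by simpa using hc
  simp [dedupStep, hm]

theorem step_eqp {S : PySem.Set Int} {k : List Int} {x : Int}
    (hc : S.contains x = false) :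
    dedupStep (S, k, some x) x = (PySem.Set.add S x, k, none) := by
  have hm : x ∉ S := by simpa using hc
  simp [dedupStep, hm]

theorem step_nep {S : PySem.Set Int} {k : List Int} {q x : Int}
    (hc : S.contains x = false) (h : q ≠ x) :
    dedupStep (S, k, some q) x = (S, k ++ [q], some x) := by
  have hm : x ∉ S := by simpa using hc
  simp [dedupStep, hm, h]

theorem contains_add_int (S : PySem.Set Int) (x y : Int) :
    (PySem.Set.add S x).contains y = (S.contains y || decide (y = x)) := by
  rw [Bool.eq_iff_iff]
  simp only [Bool.or_eq_true, decide_eq_true_eq, PySem.Set.contains_iff, PySem.Set.mem_add]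

-- skipping banned elements: filtering out one already-banned value does not change the loop
theorem loop_erase (l : List Int) (a : Int) :
    ∀ (S : PySem.Set Int) (k : List Int) (p : Option Int), S.contains a →
    l.foldl dedupStep (S, k, p) =
      (l.filter (fun i => i ≠ a)).foldl dedupStep (S, k, p) := by
  induction l with
  | nil => intro S k p _; rfl
  | cons x l ih =>
    intro S k p hSa
    by_cases hxa : x = a
    · subst hxa
      rw [List.filter_cons_of_neg (by simp), List.foldl_cons, step_banned hSa]
      exact ih S k p hSa
    · rw [List.filter_cons_of_pos (by simp [hxa]), List.foldl_cons, List.foldl_cons]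
      by_cases hc : S.contains x
      · rw [step_banned hc]; exact ih S k p hSa
      · rw [Bool.not_eq_true] at hc
        cases p with
        | none => rw [step_none hc]; exact ih S k (some x) hSa
        | some q =>
          by_cases hqx : q = x
          · subst hqx
            rw [step_eqp hc]
            apply ih
            rw [contains_add_int, hSa]; rfl
          · rw [step_nep hc hqx]; exact ih S (k ++ [q]) (some x) hSa

-- the banned set only matters through membership of the traversed elements
theorem loop_congr (l : List Int) :
    ∀ (S T : PySem.Set Int) (k : List Int) (p : Option Int),
    (∀ x ∈ l, S.contains x = T.contains x) →
    (l.foldl dedupStep (S, k, p)).2 = (l.foldl dedupStep (T, k, p)).2 := by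
  induction l with
  | nil => intro S T k p _; rfl
  | cons x l ih =>
    intro S T k p h
    have hx := h x (by simp)
    have hrest : ∀ y ∈ l, S.contains y = T.contains y := fun y hy => h y (by simp [hy])
    simp only [List.foldl_cons]
    by_cases hc : S.contains x
    · rw [step_banned hc, step_banned (by rw [← hx]; exact hc)]
      exact ih S T k p hrest
    · rw [Bool.not_eq_true] at hc
      have hcT : T.contains x = false := by rw [← hx]; exact hc
      cases p with
      | none =>
        rw [step_none hc, step_none hcT]
        exact ih S T k (some x) hrest
      | some q =>
        by_cases hqx : q = x
        · subst hqx
          rw [step_eqp hc, step_eqp hcT]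
          apply ih
          intro y hy
          rw [contains_add_int, contains_add_int, hrest y hy]
        · rw [step_nep hc hqx, step_nep hcT hqx]
          exact ih S T (k ++ [q]) (some x) hrest

-- the kept list is only ever appended to, so a prefix factors out
theorem loop_prefix (l : List Int) :
    ∀ (S : PySem.Set Int) (k0 k : List Int) (p : Option Int),
    l.foldl dedupStep (S, k0 ++ k, p) =
      ((l.foldl dedupStep (S, k, p)).1, k0 ++ (l.foldl dedupStep (S, k, p)).2.1,
        (l.foldl dedupStep (S, k, p)).2.2) := by
  induction l with
  | nil => intro S k0 k p; rfl
  | cons x l ih =>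
    intro S k0 k p
    simp only [List.foldl_cons]
    by_cases hc : S.contains x
    · rw [step_banned hc, step_banned hc]; exact ih S k0 k p
    · rw [Bool.not_eq_true] at hc
      cases p with
      | none => rw [step_none hc, step_none hc]; exact ih S k0 k (some x)
      | some q =>
        by_cases hqx : q = x
        · subst hqx
          rw [step_eqp hc, step_eqp hc]; exact ih _ k0 k none
        · rw [step_nep hc hqx, step_nep hc hqx, List.append_assoc]
          exact ih S k0 (k ++ [q]) (some x)

theorem contains_empty_int (x : Int) :
    (PySem.Set.empty : PySem.Set Int).contains x = false := by rfl

theorem main_lemma : ∀ (n : ℕ) (l : List Int), l.length ≤ n →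
    deduplicate_s l = dedupFin (l.foldl dedupStep (PySem.Set.empty, [], none)) := by
  intro n
  induction n with
  | zero =>
    intro l hl
    have : l = [] := List.length_eq_zero_iff.mp (Nat.le_zero.mp hl)
    subst this
    simp [deduplicate_s, dedupFin]
  | succ n ih =>
    intro l hl
    match l with
    | [] => simp [deduplicate_s, dedupFin]
    | [a] =>
      rw [deduplicate_s]
      simp only [List.foldl_cons, List.foldl_nil, step_none (contains_empty_int a)]
      rfl
    | a :: b :: rest =>
      by_cases hba : b = a
      · subst hba
        rw [deduplicate_s]
        rw [if_pos rfl]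
        have hAf : (b :: rest).filter (fun i => i ≠ b) = rest.filter (fun i => i ≠ b) :=
          List.filter_cons_of_neg (by simp)
        have hcb : (PySem.Set.add PySem.Set.empty b).contains b = true := by
          rw [contains_add_int, contains_empty_int]; simp
        have hB2 : (b :: b :: rest).foldl dedupStep (PySem.Set.empty, [], none) =
            rest.foldl dedupStep (PySem.Set.add PySem.Set.empty b, [], none) := by
          simp only [List.foldl_cons, step_none (contains_empty_int b),
            step_eqp (contains_empty_int b)]
        rw [hAf, hB2, loop_erase rest b _ [] none hcb]
        have hcong := loop_congr (rest.filter (fun i => i ≠ b))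
          (PySem.Set.add PySem.Set.empty b) PySem.Set.empty [] none
          (by
            intro y hy
            have hyb : y ≠ b := by simpa using List.of_mem_filter hy
            simp [hyb])
        have hlen : (rest.filter (fun i => decide (i ≠ b))).length ≤ n := by
          have h1 := List.length_filter_le (fun i => decide (i ≠ b)) rest
          have h2 : (b :: b :: rest).length ≤ n + 1 := hl
          simp at h2
          omega
        rw [ih _ hlen]
        unfold dedupFin
        rw [hcong]
      · rw [deduplicate_s]
        rw [if_neg hba]
        have hB2 : (a :: b :: rest).foldl dedupStep (PySem.Set.empty, [], none) =
            rest.foldl dedupStep (PySem.Set.empty, [a], some b) := by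
          simp only [List.foldl_cons, step_none (contains_empty_int a),
            step_nep (contains_empty_int b) (Ne.symm hba), List.nil_append]
        have hBtail : (b :: rest).foldl dedupStep (PySem.Set.empty, [], none) =
            rest.foldl dedupStep (PySem.Set.empty, [], some b) := by
          simp only [List.foldl_cons, step_none (contains_empty_int b)]
        have hlen : (b :: rest).length ≤ n := by
          have : (a :: b :: rest).length ≤ n + 1 := hl
          simpa using this
        have hp := loop_prefix rest PySem.Set.empty [a] [] (some b)
        simp only [List.append_nil] at hp
        rw [ih _ hlen, hB2, hBtail, hp]
        unfold dedupFin
        rcases (rest.foldl dedupStep (PySem.Set.empty, [], some b)).2.2 with _ | q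
        · simp
        · simp

-- ===== VERDICT (by name: the statement is the Claim_ definition above) =====
theorem deduplicate_s_spec : Claim_equal_deduplicate_s := by
  intro nums _
  unfold Spec_deduplicate_s
  rw [alt_eq_fin]
  exact main_lemma nums.length nums (le_refl _)
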